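-- pv_equiv track=rewrite | github.com/FredTheDino/Fog | doc-builder.py | format_func
-- ===== SOURCE A (Python) =====
-- def format_func(comment):
--     out = ""
--     in_comment = False
--     for line in comment.split("\n"):
--         if not in_comment and line.startswith("//"):
--             in_comment = True
--             if out:
--                 out += "</p>"
--             out += "<p class='func comment'>"
--         if in_comment and not line.startswith("//"):
--             in_comment = False
--             out += "</p>"
--             out += "<p class='func code'>"
--         if in_comment:
--             out += line.replace("//", "").strip()
--         else:
--             out += line
--     return out
-- ===== SOURCE B (Python) =====
-- def format_func(comment):
--     # Group consecutive lines by whether they start with "//", then render each run.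
--     groups = []
--     for line in comment.split("\n"):
--         key = line.startswith("//")
--         if groups and groups[-1][0] == key:
--             groups[-1][1].append(line)
--         else:
--             groups.append((key, [line]))
--     out = ""
--     for i, (is_comment, grp) in enumerate(groups):
--         if is_comment:
--             if out:
--                 out += "</p>"
--             out += "<p class='func comment'>"
--             out += "".join(l.replace("//", "").strip() for l in grp)
--         else:
--             if i > 0:
--                 out += "</p><p class='func code'>"
--             out += "".join(grp)
--     return out
-- ===== Notes on version B (the rewrite author's own statement) =====
-- stated objective: alternative
-- what changed: Replaces the per-line in_comment flag toggle with a two-phase pass: first group consecutive lines into comment/code runs, then render each run as a whole (paragraph open/close decided per run, not per line).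
import Mathlib
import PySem

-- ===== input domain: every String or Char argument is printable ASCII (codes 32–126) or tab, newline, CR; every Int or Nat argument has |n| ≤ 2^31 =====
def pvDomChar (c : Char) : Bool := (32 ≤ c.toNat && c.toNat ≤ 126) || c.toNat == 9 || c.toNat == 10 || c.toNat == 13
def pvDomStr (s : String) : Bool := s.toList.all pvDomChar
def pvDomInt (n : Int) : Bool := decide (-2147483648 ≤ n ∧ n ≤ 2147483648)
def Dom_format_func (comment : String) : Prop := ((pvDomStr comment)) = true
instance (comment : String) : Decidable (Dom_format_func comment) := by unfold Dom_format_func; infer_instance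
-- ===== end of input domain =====

-- B replaces A's per-line in_comment flag toggle by a two-phase pass (group lines
-- into comment/code runs, then render each run as a whole); objective: alternative.

-- ===== PORT A =====
-- line.startswith("//")
def pvKey (line : String) : Bool := PySem.Str.startswith line "//"

-- the body of A's for-loop: three sequential ifs over the state (out, in_comment)
def pvStepA (st : String × Bool) (line : String) : String × Bool :=
  let s1 : String × Bool :=
    if !st.2 && pvKey line then
      ((if st.1.isEmpty then st.1 else st.1 ++ "</p>") ++ "<p class='func comment'>", true)
    else st
  let s2 : String × Bool :=
    if s1.2 && !(pvKey line) then
      (s1.1 ++ "</p>" ++ "<p class='func code'>", false)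
    else s1
  if s2.2 then (s2.1 ++ PySem.Str.strip (PySem.Str.replace line "//" ""), s2.2)
  else (s2.1 ++ line, s2.2)

-- comment.split("\n"): split? is some for the nonempty separator "\n", getD is never taken
def format_func (comment : String) : String :=
  (((PySem.Str.split? comment "\n").getD []).foldl pvStepA ("", false)).1

-- ===== PORT B =====
-- l.replace("//", "").strip()
def pvProc (l : String) : String := PySem.Str.strip (PySem.Str.replace l "//" "")

-- B's grouping loop body: append the line to the last group if the key matches, else start a new group
def pvAddLine (gs : List (Bool × List String)) (line : String) : List (Bool × List String) :=
  let key := pvKey line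
  match gs.getLast? with
  | some last =>
      if last.1 == key then gs.dropLast ++ [(last.1, last.2 ++ [line])]
      else gs ++ [(key, [line])]
  | none => [(key, [line])]

-- B's rendering loop body over enumerate(groups)
def pvRender (out : String) (p : Int × (Bool × List String)) : String :=
  if p.2.1 then
    ((if out.isEmpty then out else out ++ "</p>") ++ "<p class='func comment'>")
      ++ PySem.Str.join "" (p.2.2.map pvProc)
  else
    (if p.1 > 0 then out ++ "</p><p class='func code'>" else out) ++ PySem.Str.join "" p.2.2

def format_func_alt (comment : String) : String :=
  let groups := ((PySem.Str.split? comment "\n").getD []).foldl pvAddLine []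
  (PySem.List.enumerate groups 0).foldl pvRender ""

-- ===== PRECONDITION & SPEC =====
def Spec_format_func (comment : String) (out : String) : Prop := out = format_func_alt comment
instance (comment : String) (out : String) : Decidable (Spec_format_func comment out) := by unfold Spec_format_func; infer_instance

-- ===== CLAIM (what is proved, stated in full; the proofs are below) =====
def Claim_equal_format_func : Prop := ∀ (comment : String), Dom_format_func comment → Spec_format_func comment (format_func comment)

-- ===== LEMMAS AND PROOFS =====

-- "".join of a cons
theorem pvJoin_cons (x : String) (xs : List String) :
    PySem.Str.join "" (x :: xs) = x ++ PySem.Str.join "" xs := by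
  cases xs with
  | nil => simp [PySem.Str.join, PySem.Chars.join_nil, PySem.Chars.join_singleton]
  | cons y ys => simp [PySem.Str.join, PySem.Chars.join_cons_cons]

theorem pvJoin_nil : PySem.Str.join "" ([] : List String) = "" := by
  simp [PySem.Str.join, PySem.Chars.join_nil]

-- the invariant maintained by B's grouping loop
def pvInv (gs : List (Bool × List String)) : Prop :=
  (∀ p ∈ gs, p.2 ≠ [] ∧ ∀ l ∈ p.2, pvKey l = p.1) ∧ gs.IsChain (fun a b => a.1 ≠ b.1)

theorem pvAddLine_concat (ys : List (Bool × List String)) (y : Bool × List String) (line : String) :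
    pvAddLine (ys ++ [y]) line =
      if y.1 == pvKey line then ys ++ [(y.1, y.2 ++ [line])]
      else (ys ++ [y]) ++ [(pvKey line, [line])] := by
  simp only [pvAddLine, List.getLast?_concat, List.dropLast_concat]

theorem pvFlat_addLine (gs : List (Bool × List String)) (line : String) :
    (pvAddLine gs line).flatMap (·.2) = gs.flatMap (·.2) ++ [line] := by
  rcases List.eq_nil_or_concat' gs with rfl | ⟨ys, y, rfl⟩
  · simp [pvAddLine]
  · rw [pvAddLine_concat]
    split <;> simp

theorem pvInv_addLine (gs : List (Bool × List String)) (line : String) (h : pvInv gs) :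
    pvInv (pvAddLine gs line) := by
  obtain ⟨hmem, hch⟩ := h
  rcases List.eq_nil_or_concat' gs with rfl | ⟨ys, y, rfl⟩
  · constructor
    · intro p hp
      simp [pvAddLine] at hp
      subst hp
      simp
    · exact List.IsChain.singleton _
  · rw [pvAddLine_concat]
    split
    · rename_i hbeq
      have hkey : y.1 = pvKey line := by simpa using hbeq
      constructor
      · intro p hp
        rcases List.mem_append.1 hp with hp | hp
        · exact hmem p (List.mem_append_left _ hp)
        · simp only [List.mem_singleton] at hp
          subst hp
          refine ⟨by simp, ?_⟩
          intro l hl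
          rcases List.mem_append.1 hl with hl | hl
          · exact (hmem y (by simp)).2 l hl
          · simp only [List.mem_singleton] at hl; subst hl; exact hkey.symm
      · obtain ⟨h1, _, hcross⟩ := List.isChain_append.1 hch
        refine List.isChain_append.2 ⟨h1, List.IsChain.singleton _, ?_⟩
        intro a ha b hb
        simp only [List.head?_cons, Option.mem_some_iff] at hb
        subst hb
        exact hcross a ha y (by simp)
    · rename_i hbeq
      have hkey : ¬ y.1 = pvKey line := by simpa using hbeq
      constructor
      · intro p hp
        rcases List.mem_append.1 hp with hp | hp
        · exact hmem p hp
        · simp only [List.mem_singleton] at hp; subst hp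
          exact ⟨by simp, by intro l hl; simp only [List.mem_singleton] at hl; subst hl; rfl⟩
      · refine List.isChain_append.2 ⟨hch, List.IsChain.singleton _, ?_⟩
        intro a ha b hb
        simp only [List.getLast?_concat, Option.mem_some_iff] at ha
        simp only [List.head?_cons, Option.mem_some_iff] at hb
        subst ha; subst hb
        exact hkey

theorem pvGroups_spec (lines : List String) :
    ∀ gs, pvInv gs →
      pvInv (lines.foldl pvAddLine gs) ∧
      (lines.foldl pvAddLine gs).flatMap (·.2) = gs.flatMap (·.2) ++ lines := by
  induction lines with
  | nil => intro gs h; exact ⟨h, by simp⟩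
  | cons l ls ih =>
      intro gs h
      have h1 := pvInv_addLine gs l h
      obtain ⟨hi, hf⟩ := ih (pvAddLine gs l) h1
      refine ⟨hi, ?_⟩
      rw [List.foldl_cons] at *
      rw [hf, pvFlat_addLine]
      simp

-- run of comment lines with in_comment already true
theorem pvA_comment_run (g : List String) : ∀ out, (∀ l ∈ g, pvKey l = true) →
    g.foldl pvStepA (out, true) = (out ++ PySem.Str.join "" (g.map pvProc), true) := by
  induction g with
  | nil => intro out _; simp [pvJoin_nil]
  | cons l ls ih =>
      intro out hk
      have hl : pvKey l = true := hk l (by simp)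
      have : pvStepA (out, true) l = (out ++ pvProc l, true) := by
        simp [pvStepA, hl, pvProc]
      rw [List.foldl_cons, this, ih _ (fun x hx => hk x (by simp [hx]))]
      rw [List.map_cons, pvJoin_cons, String.append_assoc]

-- run of code lines with in_comment false
theorem pvA_code_run (g : List String) : ∀ out, (∀ l ∈ g, pvKey l = false) →
    g.foldl pvStepA (out, false) = (out ++ PySem.Str.join "" g, false) := by
  induction g with
  | nil => intro out _; simp [pvJoin_nil]
  | cons l ls ih =>
      intro out hk
      have hl : pvKey l = false := hk l (by simp)
      have : pvStepA (out, false) l = (out ++ l, false) := by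
        simp [pvStepA, hl]
      rw [List.foldl_cons, this, ih _ (fun x hx => hk x (by simp [hx]))]
      rw [pvJoin_cons, String.append_assoc]

-- a whole comment group starting with in_comment = false
theorem pvA_comment_group (g : List String) (out : String) (hne : g ≠ [])
    (hk : ∀ l ∈ g, pvKey l = true) :
    g.foldl pvStepA (out, false) =
      (((if out.isEmpty then out else out ++ "</p>") ++ "<p class='func comment'>")
        ++ PySem.Str.join "" (g.map pvProc), true) := by
  cases g with
  | nil => exact absurd rfl hne
  | cons l ls =>
      have hl : pvKey l = true := hk l (by simp)
      have hstep : pvStepA (out, false) l =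
          (((if out.isEmpty then out else out ++ "</p>") ++ "<p class='func comment'>") ++ pvProc l, true) := by
        simp [pvStepA, hl, pvProc]
      rw [List.foldl_cons, hstep, pvA_comment_run ls _ (fun x hx => hk x (by simp [hx]))]
      rw [List.map_cons, pvJoin_cons, String.append_assoc]

theorem pvLit (s : String) :
    s ++ "</p>" ++ "<p class='func code'>" = s ++ "</p><p class='func code'>" := by
  rw [String.append_assoc]
  rfl

-- a whole code group starting with in_comment = true
theorem pvA_code_group (g : List String) (out : String) (hne : g ≠ [])
    (hk : ∀ l ∈ g, pvKey l = false) :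
    g.foldl pvStepA (out, true) =
      (out ++ "</p><p class='func code'>" ++ PySem.Str.join "" g, false) := by
  cases g with
  | nil => exact absurd rfl hne
  | cons l ls =>
      have hl : pvKey l = false := hk l (by simp)
      have hstep : pvStepA (out, true) l = (out ++ "</p>" ++ "<p class='func code'>" ++ l, false) := by
        simp [pvStepA, hl]
      rw [List.foldl_cons, hstep, pvA_code_run ls _ (fun x hx => hk x (by simp [hx]))]
      rw [pvJoin_cons, pvLit out, String.append_assoc]

-- index-free form of B's rendering of the non-initial groups
def pvRenderRest : List (Bool × List String) → String → String
  | [], out => out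
  | (k, g) :: t, out =>
      pvRenderRest t
        (if k then
          ((if out.isEmpty then out else out ++ "</p>") ++ "<p class='func comment'>")
            ++ PySem.Str.join "" (g.map pvProc)
        else (out ++ "</p><p class='func code'>") ++ PySem.Str.join "" g)

theorem pvEnum_render (gs : List (Bool × List String)) : ∀ (s : Int) (out : String), 0 < s →
    (PySem.List.enumerate gs s).foldl pvRender out = pvRenderRest gs out := by
  induction gs with
  | nil => intro s out _; simp [PySem.List.enumerate_nil, pvRenderRest]
  | cons p t ih =>
      intro s out hs
      rw [PySem.List.enumerate_cons, List.foldl_cons]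
      obtain ⟨k, g⟩ := p
      have : pvRender out (s, (k, g)) =
          (if k then
            ((if out.isEmpty then out else out ++ "</p>") ++ "<p class='func comment'>")
              ++ PySem.Str.join "" (g.map pvProc)
          else (out ++ "</p><p class='func code'>") ++ PySem.Str.join "" g) := by
        simp [pvRender, hs]
      rw [this, ih (s + 1) _ (by omega)]
      rfl

-- final value of the in_comment flag after the remaining groups
def pvLastKeyD (gs : List (Bool × List String)) (inc : Bool) : Bool :=
  ((gs.getLast?).map (·.1)).getD inc

theorem pvLastKeyD_cons (q : Bool × List String) (u : List (Bool × List String)) (i i' : Bool) :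
    pvLastKeyD (q :: u) i = pvLastKeyD (q :: u) i' := by
  induction u generalizing q with
  | nil => simp [pvLastKeyD]
  | cons r u ih => simp only [pvLastKeyD, List.getLast?_cons_cons] at *; exact ih r

theorem pvRest (gs : List (Bool × List String)) : ∀ (out : String) (inc : Bool),
    pvInv gs → (∀ k g t, gs = (k, g) :: t → inc = !k) →
    (gs.flatMap (·.2)).foldl pvStepA (out, inc) = (pvRenderRest gs out, pvLastKeyD gs inc) := by
  induction gs with
  | nil => intro out inc _ _; simp [pvRenderRest, pvLastKeyD]
  | cons p t ih =>
      intro out inc hinv hhd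
      obtain ⟨k, g⟩ := p
      obtain ⟨hmem, hch⟩ := hinv
      have hg : g ≠ [] := (hmem (k, g) (by simp)).1
      have hgk : ∀ l ∈ g, pvKey l = k := (hmem (k, g) (by simp)).2
      have hinc : inc = !k := hhd k g t rfl
      have hinvt : pvInv t := ⟨fun p hp => hmem p (by simp [hp]), List.IsChain.of_cons hch⟩
      have hhdt : ∀ k' g' t', t = (k', g') :: t' → (k : Bool) = !k' := by
        intro k' g' t' ht
        subst ht
        have h2 := List.IsChain.rel hch
        cases k <;> cases k' <;> simp_all
      have hflat : ((k, g) :: t).flatMap (fun x => x.2) = g ++ t.flatMap (fun x => x.2) := by simp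
      rw [hflat, List.foldl_append]
      cases k with
      | true =>
          have hinc' : inc = false := by simpa using hinc
          subst hinc'
          rw [pvA_comment_group g out hg (by simpa using hgk)]
          rw [ih _ true hinvt (by intro k' g' t' ht; have := hhdt k' g' t' ht; simp_all)]
          have hlast : pvLastKeyD t true = pvLastKeyD ((true, g) :: t) false := by
            cases t with
            | nil => simp [pvLastKeyD]
            | cons q u => exact pvLastKeyD_cons q u true false
          rw [hlast]
          rfl
      | false =>
          have hinc' : inc = true := by simpa using hinc
          subst hinc'
          rw [pvA_code_group g out hg (by simpa using hgk)]
          rw [ih _ false hinvt (by intro k' g' t' ht; have := hhdt k' g' t' ht; simp_all)]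
          have hlast : pvLastKeyD t false = pvLastKeyD ((false, g) :: t) true := by
            cases t with
            | nil => simp [pvLastKeyD]
            | cons q u => exact pvLastKeyD_cons q u false true
          rw [hlast]
          rfl

-- main lemma: for any list of lines, A's fold equals B's group-and-render
theorem pvTop (gs : List (Bool × List String)) (hinv : pvInv gs) :
    ((gs.flatMap (·.2)).foldl pvStepA ("", false)).1 =
      (PySem.List.enumerate gs 0).foldl pvRender "" := by
  cases gs with
  | nil => simp [PySem.List.enumerate_nil]
  | cons p t =>
      obtain ⟨k, g⟩ := p
      obtain ⟨hmem, hch⟩ := hinv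
      have hg : g ≠ [] := (hmem (k, g) (by simp)).1
      have hgk : ∀ l ∈ g, pvKey l = k := (hmem (k, g) (by simp)).2
      have hinvt : pvInv t := ⟨fun p hp => hmem p (by simp [hp]), List.IsChain.of_cons hch⟩
      have hflatc : ((k, g) :: t).flatMap (fun x => x.2) = g ++ t.flatMap (fun x => x.2) := by simp
      rw [hflatc, List.foldl_append, PySem.List.enumerate_cons, List.foldl_cons]
      have hhdt : ∀ k' g' t', t = (k', g') :: t' → (k : Bool) = !k' := by
        intro k' g' t' ht
        subst ht
        have h2 := List.IsChain.rel hch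
        cases k <;> cases k' <;> simp_all
      cases k with
      | true =>
          rw [pvA_comment_group g "" hg (by simpa using hgk)]
          have hr : pvRender "" ((0 : Int), (true, g)) =
              ((if ("" : String).isEmpty then "" else "" ++ "</p>") ++ "<p class='func comment'>")
                ++ PySem.Str.join "" (g.map pvProc) := by
            simp [pvRender]
          rw [hr]
          rw [pvRest t _ true hinvt (by intro k' g' t' ht; have := hhdt k' g' t' ht; simp_all)]
          rw [pvEnum_render t (0 + 1) _ (by omega)]
      | false =>
          rw [pvA_code_run g "" (by simpa using hgk)]
          have hr : pvRender "" ((0 : Int), (false, g)) = "" ++ PySem.Str.join "" g := by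
            simp [pvRender]
          rw [hr]
          rw [pvRest t _ false hinvt (by intro k' g' t' ht; have := hhdt k' g' t' ht; simp_all)]
          rw [pvEnum_render t (0 + 1) _ (by omega)]

-- main lemma: for any list of lines, A's fold equals B's group-and-render
theorem pvMain (lines : List String) :
    (lines.foldl pvStepA ("", false)).1 =
      (PySem.List.enumerate (lines.foldl pvAddLine []) 0).foldl pvRender "" := by
  obtain ⟨hinv, hflat⟩ := pvGroups_spec lines [] ⟨by simp, List.IsChain.nil⟩
  have hlines : lines = (lines.foldl pvAddLine []).flatMap (·.2) := by simpa using hflat.symm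
  conv_lhs => rw [hlines]
  exact pvTop _ hinv

-- ===== VERDICT (by name: the statement is the Claim_ definition above) =====
theorem format_func_spec : Claim_equal_format_func := by
  intro comment _
  unfold Spec_format_func format_func format_func_alt
  exact pvMain _
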